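-- pv_equiv track=rewrite | github.com/maread99/aoc | 2023/13_rev.py | get_pat_value
-- ===== SOURCE A (Python) =====
-- def get_pat_value(rows: list[str]) -> int:
--     for i in range(1, len(rows)):
--         above = rows[:i][::-1]
--         below = rows[i:]
--
--         # compare contents in mirrored rows
--         diffs = 0
--         for a, b in zip(above, below):
--             for x, y in zip(a, b):
--                 if x != y:
--                     diffs += 1
--             if diffs > 1:
--                 break
--         if diffs == 1:
--             return i
--     return 0
-- ===== SOURCE B (Python) =====
-- def get_pat_value(rows: list[str]) -> int:
--     # Precompute, bucketed by anti-diagonal s = j + k, the smudge count of every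
--     # row pair (capped at 2: only 0/1/2+ matters), then scan folds: fold i is
--     # valid iff bucket 2*i - 1 holds exactly one smudge.
--     n = len(rows)
--     diag = [0] * (2 * n)
--     for j in range(n):
--         rj = rows[j]
--         for k in range(j + 1, n):
--             c = 0
--             for x, y in zip(rj, rows[k]):
--                 if x != y:
--                     c += 1
--                     if c == 2:
--                         break
--             diag[j + k] += c
--     for i in range(1, n):
--         if diag[2 * i - 1] == 1:
--             return i
--     return 0
-- ===== Notes on version B (the rewrite author's own statement) =====
-- stated objective: alternative
-- what changed: B replaces A's per-fold slice-reverse-zip scan with early break by a staged table computation: one pass over all row pairs (j,k) accumulates their smudge count (capped at 2, since only 0/1/many matters) into buckets keyed by the anti-diagonal j+k, then a second pass returns the first fold i whose bucket 2*i-1 holds exactly one smudge; correct because the rows mirrored around fold i are exactly the pairs with j+k = 2*i-1.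
import Mathlib
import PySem

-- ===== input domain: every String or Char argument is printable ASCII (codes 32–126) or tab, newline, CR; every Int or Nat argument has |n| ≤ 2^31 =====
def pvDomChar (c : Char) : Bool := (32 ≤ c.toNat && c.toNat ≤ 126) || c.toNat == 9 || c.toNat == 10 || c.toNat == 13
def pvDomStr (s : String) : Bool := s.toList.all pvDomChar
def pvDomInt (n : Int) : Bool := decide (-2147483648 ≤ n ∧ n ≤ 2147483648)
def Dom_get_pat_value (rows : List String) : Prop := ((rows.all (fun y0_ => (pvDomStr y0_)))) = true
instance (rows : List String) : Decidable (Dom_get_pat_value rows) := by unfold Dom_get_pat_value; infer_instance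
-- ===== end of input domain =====

-- B precomputes capped smudge counts of all row pairs into buckets keyed by the anti-diagonal
-- j+k, then scans folds (the pairs mirrored at fold i are those with j+k = 2i-1); alternative
-- algorithm, same return value as A.

-- ===== PORT A =====
-- inner 'for a, b in zip(above, below): for x, y in zip(a, b): …; if diffs > 1: break'
def pvLoopA : List (String × String) → Int → Int
  | [], diffs => diffs
  | p :: rest, diffs =>
      let diffs := (p.1.toList.zip p.2.toList).foldl
        (fun d q => if q.1 ≠ q.2 then d + 1 else d) diffs
      if diffs > 1 then diffs else pvLoopA rest diffs

-- outer 'for i in range(1, len(rows)): …; return i / return 0'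
def pvOuterA (rows : List String) : List Int → Int
  | [] => 0
  | i :: rest =>
      -- rows[:i][::-1]  ([::-1] is reverse: PySem.List.slice?_none_none_neg_one)
      let above := (PySem.List.slice rows none (some i)).reverse
      let below := PySem.List.slice rows (some i) none  -- rows[i:]
      let diffs := pvLoopA (above.zip below) 0
      if diffs = 1 then i else pvOuterA rows rest

def get_pat_value (rows : List String) : Int :=
  pvOuterA rows (PySem.List.pyRange 1 (rows.length : Int) 1)

-- ===== PORT B =====
-- 'c = 0; for x, y in zip(rj, rows[k]): if x != y: c += 1; if c == 2: break'
def pvDiff2 : List (Char × Char) → Int → Int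
  | [], c => c
  | q :: rest, c =>
      if q.1 ≠ q.2 then
        if c + 1 = 2 then c + 1 else pvDiff2 rest (c + 1)
      else pvDiff2 rest c

-- the capped smudge count of the pair rows[j], rows[k] (indices are nonneg and in range here)
def pvPairC (rows : List String) (j k : Int) : Int :=
  pvDiff2 ((PySem.List.pyGetD rows j "").toList.zip (PySem.List.pyGetD rows k "").toList) 0

-- 'diag[s] += c' (s = j + k is always nonnegative and < len(diag) at the call sites)
def pvBump (diag : List Int) (s : Nat) (c : Int) : List Int :=
  diag.set s (diag.getD s 0 + c)

-- inner 'for k in range(j + 1, n): …; diag[j + k] += c'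
def pvInnerB (rows : List String) (j : Int) : List Int → List Int → List Int
  | [], diag => diag
  | k :: ks, diag => pvInnerB rows j ks (pvBump diag (j + k).toNat (pvPairC rows j k))

-- outer 'for j in range(n): rj = rows[j]; …'
def pvOuterBj (rows : List String) : List Int → List Int → List Int
  | [], diag => diag
  | j :: js, diag =>
      pvOuterBj rows js (pvInnerB rows j (PySem.List.pyRange (j + 1) (rows.length : Int) 1) diag)

-- 'for i in range(1, n): if diag[2*i-1] == 1: return i; return 0' (2*i-1 is always in range)
def pvScanB (diag : List Int) : List Int → Int
  | [] => 0
  | i :: rest => if PySem.List.pyGetD diag (2 * i - 1) 0 = 1 then i else pvScanB diag rest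

def get_pat_value_alt (rows : List String) : Int :=
  let diag := pvOuterBj rows (PySem.List.pyRange 0 (rows.length : Int) 1)
      (List.replicate (2 * rows.length) 0)
  pvScanB diag (PySem.List.pyRange 1 (rows.length : Int) 1)

-- ===== PRECONDITION & SPEC =====
def Spec_get_pat_value (rows : List String) (out : Int) : Prop := out = get_pat_value_alt rows
instance (rows : List String) (out : Int) : Decidable (Spec_get_pat_value rows out) := by unfold Spec_get_pat_value; infer_instance

-- ===== CLAIM (what is proved, stated in full; the proofs are below) =====
def Claim_equal_get_pat_value : Prop := ∀ (rows : List String), Dom_get_pat_value rows → Spec_get_pat_value rows (get_pat_value rows)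

-- ===== LEMMAS AND PROOFS =====

-- exact (uncapped) smudge count of two rows
def pvF (a b : String) : Int :=
  ((a.toList.zip b.toList).map (fun q => if q.1 ≠ q.2 then (1 : Int) else 0)).sum

theorem pvInd_nonneg (l : List (Char × Char)) :
    0 ≤ (l.map (fun q => if q.1 ≠ q.2 then (1 : Int) else 0)).sum := by
  apply List.sum_nonneg
  intro x hx
  obtain ⟨q, -, rfl⟩ := List.mem_map.mp hx
  split <;> omega

theorem pvF_nonneg (a b : String) : 0 ≤ pvF a b := pvInd_nonneg _

theorem pvFsum_nonneg (l : List (String × String)) :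
    0 ≤ (l.map (fun p => pvF p.1 p.2)).sum := by
  apply List.sum_nonneg
  intro x hx
  obtain ⟨p, -, rfl⟩ := List.mem_map.mp hx
  exact pvF_nonneg _ _

-- A's inner char fold, written as a 0/1 sum
theorem pvCharFold (l : List (Char × Char)) (d : Int) :
    l.foldl (fun d q => if q.1 ≠ q.2 then d + 1 else d) d
      = d + (l.map (fun q => if q.1 ≠ q.2 then (1 : Int) else 0)).sum := by
  rw [show (fun (d : Int) (q : Char × Char) => if q.1 ≠ q.2 then d + 1 else d)
      = (fun d q => d + (if q.1 ≠ q.2 then (1 : Int) else 0)) from by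
    funext d q; split <;> omega]
  exact PySem.List.foldl_add l _ d

-- A's pair loop tests 'exactly one smudge in total' despite the early break
theorem pvLoopA_eq_one : ∀ (l : List (String × String)) (d : Int),
    (pvLoopA l d = 1 ↔ d + (l.map (fun p => pvF p.1 p.2)).sum = 1) := by
  intro l
  induction l with
  | nil => intro d; simp [pvLoopA]
  | cons p rest ih =>
    intro d
    simp only [pvLoopA, pvCharFold, List.map_cons, List.sum_cons]
    have hF : (List.map (fun q => if q.1 ≠ q.2 then (1 : Int) else 0)
        (p.1.toList.zip p.2.toList)).sum = pvF p.1 p.2 := rfl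
    rw [hF]
    by_cases hgt : d + pvF p.1 p.2 > 1
    · rw [if_pos hgt]
      have h1 := pvFsum_nonneg rest
      omega
    · rw [if_neg hgt, ih]
      have h1 := pvFsum_nonneg rest
      omega

-- B's capped char loop computes min(full count, 2)
theorem pvDiff2_eq_min : ∀ (l : List (Char × Char)) (c : Int), 0 ≤ c → c < 2 →
    pvDiff2 l c = min (c + (l.map (fun q => if q.1 ≠ q.2 then (1 : Int) else 0)).sum) 2 := by
  intro l
  induction l with
  | nil => intro c h0 h2; simp [pvDiff2]; omega
  | cons q rest ih =>
    intro c h0 h2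
    have hs := pvInd_nonneg rest
    simp only [pvDiff2, List.map_cons, List.sum_cons]
    by_cases hq : q.1 ≠ q.2
    · simp only [if_pos hq]
      by_cases hc : c + 1 = 2
      · rw [if_pos hc]
        omega
      · rw [if_neg hc, ih (c + 1) (by omega) (by omega)]
        omega
    · simp only [if_neg hq]
      rw [ih c h0 h2]
      omega

-- a sum of capped (at 2) nonnegatives equals the uncapped sum or both are ≥ 2
theorem pvCapSum : ∀ (ds : List Int), (∀ d ∈ ds, 0 ≤ d) →
    ((ds.map (fun d => min d 2)).sum = ds.sum ∨
      (2 ≤ (ds.map (fun d => min d 2)).sum ∧ 2 ≤ ds.sum)) := by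
  intro ds
  induction ds with
  | nil => intro _; left; simp
  | cons d ds ih =>
    intro h
    have hd : 0 ≤ d := h d List.mem_cons_self
    have hih := ih (fun x hx => h x (List.mem_cons_of_mem _ hx))
    have h1 : 0 ≤ ds.sum := List.sum_nonneg (fun x hx => h x (List.mem_cons_of_mem _ hx))
    have h2 : 0 ≤ (ds.map (fun d => min d 2)).sum := by
      apply List.sum_nonneg
      intro x hx
      obtain ⟨y, hy, rfl⟩ := List.mem_map.mp hx
      have := h y (List.mem_cons_of_mem _ hy)
      omega
    simp only [List.map_cons, List.sum_cons]
    omega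

theorem pvBump_length (a : List Int) (t : Nat) (c : Int) : (pvBump a t c).length = a.length :=
  List.length_set ..

theorem pvBump_getD_ne (a : List Int) (t s : Nat) (c : Int) (h : t ≠ s) :
    (pvBump a t c).getD s 0 = a.getD s 0 := by
  simp [pvBump, List.getD_eq_getElem?_getD, List.getElem?_set_ne h]

theorem pvBump_getD_eq (a : List Int) (s : Nat) (c : Int) (h : s < a.length) :
    (pvBump a s c).getD s 0 = a.getD s 0 + c := by
  simp [pvBump, List.getD_eq_getElem?_getD, h]

theorem pvInnerB_length (rows : List String) (j : Int) :
    ∀ (ks : List Int) (diag : List Int), (pvInnerB rows j ks diag).length = diag.length := by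
  intro ks
  induction ks with
  | nil => intro diag; rfl
  | cons k ks ih => intro diag; rw [pvInnerB, ih, pvBump_length]

theorem pvInnerB_getD (rows : List String) (j : Int) (s : Nat) :
    ∀ (ks : List Int) (diag : List Int), s < diag.length →
    (pvInnerB rows j ks diag).getD s 0
      = diag.getD s 0 + ((ks.filter (fun k => (j + k).toNat == s)).map (fun k => pvPairC rows j k)).sum := by
  intro ks
  induction ks with
  | nil => intro diag h; simp [pvInnerB]
  | cons k ks ih =>
    intro diag h
    rw [pvInnerB, ih _ (by rw [pvBump_length]; exact h), List.filter_cons]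
    by_cases hk : (j + k).toNat = s
    · rw [if_pos (by simpa using hk), hk, pvBump_getD_eq _ _ _ h]
      simp only [List.map_cons, List.sum_cons]
      ring
    · rw [if_neg (by simpa using hk), pvBump_getD_ne _ _ _ _ hk]

theorem pvOuterBj_getD (rows : List String) (s : Nat) :
    ∀ (js : List Int) (diag : List Int), s < diag.length →
    (pvOuterBj rows js diag).getD s 0
      = diag.getD s 0 + (js.map (fun j =>
          (((PySem.List.pyRange (j + 1) (rows.length : Int) 1).filter
              (fun k => (j + k).toNat == s)).map (fun k => pvPairC rows j k)).sum)).sum := by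
  intro js
  induction js with
  | nil => intro diag h; simp [pvOuterBj]
  | cons j js ih =>
    intro diag h
    rw [pvOuterBj, ih _ (by rw [pvInnerB_length]; exact h), pvInnerB_getD rows j s _ _ h]
    simp only [List.map_cons, List.sum_cons]
    ring

-- the filter over the inner range keeps at most the single k = s - j
theorem pvFilterRange (rows : List String) (s : Nat) :
    ∀ (m : Nat) (j a : Int), 0 ≤ j → 0 ≤ a → ((rows.length : Int) - a).toNat = m →
    (((PySem.List.pyRange a (rows.length : Int) 1).filter
        (fun k => (j + k).toNat == s)).map (fun k => pvPairC rows j k)).sum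
      = if a ≤ (s : Int) - j ∧ (s : Int) - j < (rows.length : Int)
          then pvPairC rows j ((s : Int) - j) else 0 := by
  intro m
  induction m with
  | zero =>
    intro j a hj ha hm
    rw [PySem.List.pyRange_one_eq_nil (by omega)]
    rw [if_neg (by omega)]
    rfl
  | succ m ih =>
    intro j a hj ha hm
    rw [PySem.List.pyRange_one_cons (by omega), List.filter_cons]
    by_cases hk : (j + a).toNat = s
    · have hsa : (s : Int) - j = a := by omega
      rw [if_pos (by simpa using hk), List.map_cons, List.sum_cons,
          ih j (a + 1) hj (by omega) (by omega), if_neg (by omega), if_pos (by omega), hsa]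
      ring
    · rw [if_neg (by simpa using hk), ih j (a + 1) hj (by omega) (by omega)]
      by_cases hc : a + 1 ≤ (s : Int) - j ∧ (s : Int) - j < (rows.length : Int)
      · rw [if_pos hc, if_pos (by omega)]
      · rw [if_neg hc, if_neg (by omega)]

theorem pvPairC_eq (rows : List String) (j k : Int) (hj : 0 ≤ j) (hk : 0 ≤ k) :
    pvPairC rows j k = min (pvF (rows.getD j.toNat "") (rows.getD k.toNat "")) 2 := by
  unfold pvPairC
  rw [PySem.List.pyGetD_of_nonneg rows "" hj, PySem.List.pyGetD_of_nonneg rows "" hk,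
      pvDiff2_eq_min _ 0 le_rfl (by omega), zero_add]
  rfl

-- the mirrored pairs at fold i, by row index
theorem pvPairsA (rows : List String) (i : Nat) (h2 : i < rows.length) :
    ((rows.take i).reverse).zip (rows.drop i)
      = (List.range (min i (rows.length - i))).map
          (fun t => (rows.getD (i - 1 - t) "", rows.getD (i + t) "")) := by
  apply List.ext_getElem
  · simp only [List.length_zip, List.length_reverse, List.length_take, List.length_drop,
      List.length_map, List.length_range]
    omega
  · intro t ht1 ht2
    simp only [List.length_zip, List.length_reverse, List.length_take, List.length_drop] at ht1
    simp only [List.getElem_map, List.getElem_range, List.getElem_zip, List.getElem_reverse,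
      List.getElem_take, List.getElem_drop, List.length_take]
    rw [List.getD_eq_getElem rows "" (by omega), List.getD_eq_getElem rows "" (by omega)]
    congr 2; omega

-- reindex the guarded diagonal sum over j to the mirrored sum over the offset t
theorem pvReindex (n i : Nat) (h1 : 1 ≤ i) (h2 : i < n) (g : Nat → Nat → Int) :
    ∑ j ∈ Finset.range n, (if 2*i ≤ n + j ∧ j < i then g j (2*i-1-j) else 0)
      = ∑ t ∈ Finset.range (min i (n - i)), g (i-1-t) (i+t) := by
  have hsub1 : Finset.range i ⊆ Finset.range n := by
    intro x hx; simp only [Finset.mem_range] at *; omega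
  have hsub2 : Finset.range (min i (n - i)) ⊆ Finset.range i := by
    intro x hx; simp only [Finset.mem_range] at *; omega
  rw [← Finset.sum_subset hsub1
      (fun x hx hnx => by
        simp only [Finset.mem_range] at hx hnx
        rw [if_neg (by omega)])]
  rw [← Finset.sum_range_reflect]
  have e1 : ∑ t ∈ Finset.range i,
        (if 2*i ≤ n + (i-1-t) ∧ i-1-t < i then g (i-1-t) (2*i-1-(i-1-t)) else 0)
      = ∑ t ∈ Finset.range i, (if t < n - i then g (i-1-t) (i+t) else 0) :=
    Finset.sum_congr rfl (fun t ht => by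
      simp only [Finset.mem_range] at ht
      by_cases hc : t < n - i
      · rw [if_pos (by omega), if_pos hc, show 2*i-1-(i-1-t) = i+t from by omega]
      · rw [if_neg (by omega), if_neg hc])
  rw [e1]
  rw [← Finset.sum_subset hsub2
      (fun x hx hnx => by
        simp only [Finset.mem_range] at hx hnx
        rw [if_neg (by omega)])]
  exact Finset.sum_congr rfl (fun t ht => by
    simp only [Finset.mem_range] at ht
    rw [if_pos (by omega)])

-- per fold line: A's mirrored-pair test and B's diagonal bucket agree
theorem pvCond_iff (rows : List String) (i : Nat) (h1 : 1 ≤ i) (h2 : i < rows.length) :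
    (pvLoopA (((rows.take i).reverse).zip (rows.drop i)) 0 = 1
      ↔ (pvOuterBj rows (PySem.List.pyRange 0 (rows.length : Int) 1)
            (List.replicate (2 * rows.length) 0)).getD (2*i - 1) 0 = 1) := by
  have hrep : 2*i - 1 < (List.replicate (2*rows.length) (0:Int)).length := by
    simp only [List.length_replicate]; omega
  have hs : ((2*i-1 : Nat) : Int) = 2*(i:Int)-1 := by omega
  -- B's bucket value, as a guarded sum over the first row index j
  have hB1 := pvOuterBj_getD rows (2*i-1) (PySem.List.pyRange 0 (rows.length:Int) 1) _ hrep
  rw [PySem.List.pyRange_zero_nat, List.map_map] at hB1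
  have hrepl : (List.replicate (2*rows.length) (0:Int)).getD (2*i-1) 0 = 0 := by simp
  rw [hrepl, zero_add] at hB1
  have hmc : List.map
        ((fun j => (((PySem.List.pyRange (j + 1) (rows.length : Int) 1).filter
              (fun k => (j + k).toNat == 2*i-1)).map (fun k => pvPairC rows j k)).sum)
          ∘ (fun (k : Nat) => (k : Int)))
        (List.range rows.length)
      = List.map (fun jn => if 2*i ≤ rows.length + jn ∧ jn < i
          then min (pvF (rows.getD jn "") (rows.getD (2*i-1-jn) "")) 2 else 0)
        (List.range rows.length) := by
    apply List.map_congr_left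
    intro jn hjn
    rw [List.mem_range] at hjn
    simp only [Function.comp_apply]
    rw [pvFilterRange rows (2*i-1) (((rows.length : Int) - ((jn:Int)+1)).toNat)
        (jn:Int) ((jn:Int)+1) (by omega) (by omega) rfl]
    by_cases hg : 2*i ≤ rows.length + jn ∧ jn < i
    · have hgi : (jn:Int) + 1 ≤ ((2*i-1:Nat):Int) - (jn:Int)
          ∧ ((2*i-1:Nat):Int) - (jn:Int) < (rows.length:Int) := by omega
      rw [if_pos hgi, if_pos hg,
          pvPairC_eq rows (jn:Int) (((2*i-1:Nat):Int) - (jn:Int)) (by omega) (by omega),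
          show ((jn:Int)).toNat = jn from by omega,
          show (((2*i-1:Nat):Int) - (jn:Int)).toNat = 2*i-1-jn from by omega]
    · have hgi : ¬((jn:Int) + 1 ≤ ((2*i-1:Nat):Int) - (jn:Int)
          ∧ ((2*i-1:Nat):Int) - (jn:Int) < (rows.length:Int)) := by omega
      rw [if_neg hgi, if_neg hg]
  rw [hmc] at hB1
  have hB2 : (List.map (fun jn => if 2*i ≤ rows.length + jn ∧ jn < i
          then min (pvF (rows.getD jn "") (rows.getD (2*i-1-jn) "")) 2 else 0)
        (List.range rows.length)).sum
      = ∑ jn ∈ Finset.range rows.length, (if 2*i ≤ rows.length + jn ∧ jn < i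
          then (fun j k => min (pvF (rows.getD j "") (rows.getD k "")) 2) jn (2*i-1-jn) else 0) := rfl
  rw [hB2, pvReindex rows.length i h1 h2 (fun j k => min (pvF (rows.getD j "") (rows.getD k "")) 2)] at hB1
  have hB3 : (∑ t ∈ Finset.range (min i (rows.length - i)),
        (fun j k => min (pvF (rows.getD j "") (rows.getD k "")) 2) (i-1-t) (i+t))
      = ((List.range (min i (rows.length - i))).map
          (fun t => min (pvF (rows.getD (i-1-t) "") (rows.getD (i+t) "")) 2)).sum := rfl
  rw [hB3] at hB1
  -- A's test, as the uncapped sum over the offset t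
  rw [pvLoopA_eq_one, pvPairsA rows i h2, List.map_map, zero_add]
  have hcomp : ((fun p : String × String => pvF p.1 p.2)
        ∘ (fun t => (rows.getD (i-1-t) "", rows.getD (i+t) "")))
      = fun t => pvF (rows.getD (i-1-t) "") (rows.getD (i+t) "") := rfl
  rw [hcomp, PySem.List.pyRange_zero_nat, hB1]
  -- capped vs uncapped
  have hmm : (((List.range (min i (rows.length - i))).map
          (fun t => pvF (rows.getD (i-1-t) "") (rows.getD (i+t) ""))).map (fun d => min d 2))
      = (List.range (min i (rows.length - i))).map
          (fun t => min (pvF (rows.getD (i-1-t) "") (rows.getD (i+t) "")) 2) := by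
    rw [List.map_map]; rfl
  have hcap := pvCapSum ((List.range (min i (rows.length - i))).map
      (fun t => pvF (rows.getD (i-1-t) "") (rows.getD (i+t) "")))
    (by intro x hx
        obtain ⟨t, -, rfl⟩ := List.mem_map.mp hx
        exact pvF_nonneg _ _)
  rw [hmm] at hcap
  omega

-- the two result loops agree step by step over the shared candidate list
theorem pvOuterScan (rows : List String) :
    ∀ (l : List Int), (∀ x ∈ l, 1 ≤ x ∧ x < (rows.length : Int)) →
      pvOuterA rows l
        = pvScanB (pvOuterBj rows (PySem.List.pyRange 0 (rows.length : Int) 1)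
            (List.replicate (2 * rows.length) 0)) l := by
  intro l
  induction l with
  | nil => intro _; rfl
  | cons x rest ih =>
    intro h
    obtain ⟨hx1, hx2⟩ := h x List.mem_cons_self
    rw [pvOuterA, pvScanB]
    rw [PySem.List.slice_to rows (by omega), PySem.List.slice_from rows (by omega)]
    rw [PySem.List.pyGetD_of_nonneg _ _ (by omega : (0:Int) ≤ 2 * x - 1)]
    have ht : (2*x - 1).toNat = 2*x.toNat - 1 := by omega
    rw [ht]
    have hc := pvCond_iff rows x.toNat (by omega) (by omega)
    by_cases hcond : pvLoopA (((rows.take x.toNat).reverse).zip (rows.drop x.toNat)) 0 = 1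
    · rw [if_pos hcond, if_pos (hc.mp hcond)]
    · rw [if_neg hcond, if_neg (fun hh => hcond (hc.mpr hh))]
      exact ih (fun y hy => h y (List.mem_cons_of_mem _ hy))

theorem get_pat_value_spec : Claim_equal_get_pat_value := by
  intro rows _
  unfold Spec_get_pat_value get_pat_value get_pat_value_alt
  exact pvOuterScan rows _ (fun x hx => (PySem.List.mem_pyRange_one).mp hx)
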